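-- pv_equiv track=rewrite | github.com/dj-lumiere/problem-solving-boj | 백준/Gold/1005. ACM Craft/ACM Craft.py | min_time_to_build
-- ===== SOURCE A (Python) =====
-- from collections import deque
--
-- def topological_sort(n, graph):
--     indegree = [0] * (n + 1)
--     for i in range(1, n + 1):
--         for j in graph[i]:
--             indegree[j] += 1
--     queue = deque()
--     for i in range(1, n + 1):
--         if indegree[i] == 0:
--             queue.append(i)
--     result = []
--     while queue:
--         u = queue.popleft()
--         result.append(u)
--         for v in graph[u]:
--             indegree[v] -= 1
--             if indegree[v] == 0:
--                 queue.append(v)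
--
--     return result
--
-- def min_time_to_build(n, build_time, graph, w):
--     order = topological_sort(n, graph)
--     build_time_sub = [0] * (n + 1)
--     for i in order:
--         build_time_sub[i] += build_time[i]
--         for j in graph[i]:
--             build_time_sub[j] = max(build_time_sub[j], build_time_sub[i])
--     return build_time_sub[w]
-- ===== SOURCE B (Python) =====
-- def min_time_to_build(n, build_time, graph, w):
--     # Dense-DP re-implementation: build a reverse adjacency list, then iterate the
--     # longest-path recurrence n times over all nodes (no indegree array, no queue).
--     preds = [[] for _ in range(n + 1)]
--     for i in range(1, n + 1):
--         for j in graph[i]: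
--             preds[j].append(i)
--     val = [0] * (n + 1)
--     for _ in range(n):
--         val = [build_time[u] + max([0] + [val[p] for p in preds[u]])
--                for u in range(n + 1)]
--     return val[w]
-- ===== Notes on version B (the rewrite author's own statement) =====
-- stated objective: alternative
-- what changed: Replaces Kahn's indegree/FIFO-queue topological sort followed by forward relaxation with a reverse adjacency list and the longest-path recurrence iterated n times over all nodes (dense fixed-point DP: no indegree array, no queue, no topological order).
-- outside the precondition, e.g. on min_time_to_build(2, [0, 3, 4], [[], [2], [1]], 1): A returns 0, B returns 7; on min_time_to_build(2, [5, 3, 4], [[], [2], []], 0): A returns 0, B returns 5; on min_time_to_build(2, [5, 3, 4], [[], [0], []], 1): A returns 3, B returns 3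
import Mathlib
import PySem

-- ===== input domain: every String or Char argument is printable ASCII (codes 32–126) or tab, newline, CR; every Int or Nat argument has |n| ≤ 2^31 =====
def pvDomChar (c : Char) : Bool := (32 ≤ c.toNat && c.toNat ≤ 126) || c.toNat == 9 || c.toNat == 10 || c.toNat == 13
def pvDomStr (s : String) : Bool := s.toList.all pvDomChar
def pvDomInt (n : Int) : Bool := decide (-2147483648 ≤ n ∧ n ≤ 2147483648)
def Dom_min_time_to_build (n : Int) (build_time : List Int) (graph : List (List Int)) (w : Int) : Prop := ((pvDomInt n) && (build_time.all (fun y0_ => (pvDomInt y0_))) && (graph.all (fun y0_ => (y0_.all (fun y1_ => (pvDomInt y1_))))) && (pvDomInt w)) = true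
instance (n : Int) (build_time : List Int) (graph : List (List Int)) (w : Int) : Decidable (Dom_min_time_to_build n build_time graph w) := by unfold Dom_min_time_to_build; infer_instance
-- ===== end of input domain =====

-- B replaces Kahn's indegree/FIFO topological sort + forward relaxation by a reverse adjacency
-- list with the longest-path recurrence iterated n times over all nodes (alternative algorithm,
-- same return value on the stated domain; neither function mutates its arguments).

-- ===== PORT A =====
-- fuel bound for the 'while queue' loop: n+1 plus the number of edges stored in rows 1..n
-- (the loop pops once per iteration and enqueues at most once per node plus once per edge;
-- pvKahn_run below proves this fuel is never exhausted on inputs satisfying Pre_).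
def pvGraphSize (n : Int) (graph : List (List Int)) : Nat :=
  ((PySem.List.pyRange 1 (n+1) 1).map (fun p => (PySem.List.pyGetD graph p []).length)).sum

-- the 'while queue:' loop of topological_sort (deque.popleft = head, append = ++ [·]);
-- indexing via pyGetD/pySetD (defaults are never consulted on inputs satisfying Pre_)
def pvKahnLoop (graph : List (List Int)) : Nat → List Int → List Int → List Int → List Int
  | 0, _, _, res => res
  | _+1, [], _, res => res
  | f+1, u :: q, ind, res =>
    let s := (PySem.List.pyGetD graph u []).foldl
      (fun (s : List Int × List Int) v =>
        let ind2 := PySem.List.pySetD s.2 v (PySem.List.pyGetD s.2 v 0 - 1)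
        if PySem.List.pyGetD ind2 v 0 = 0 then (s.1 ++ [v], ind2) else (s.1, ind2))
      (q, ind)
    pvKahnLoop graph f s.1 s.2 (res ++ [u])

def topological_sort (n : Int) (graph : List (List Int)) : List Int :=
  let indegree := (PySem.List.pyRange 1 (n+1) 1).foldl
    (fun ind i => (PySem.List.pyGetD graph i []).foldl
      (fun ind j => PySem.List.pySetD ind j (PySem.List.pyGetD ind j 0 + 1)) ind)
    (List.replicate (n+1).toNat 0)
  let queue := (PySem.List.pyRange 1 (n+1) 1).foldl
    (fun q i => if PySem.List.pyGetD indegree i 0 = 0 then q ++ [i] else q) []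
  pvKahnLoop graph ((n+1).toNat + pvGraphSize n graph + 1) queue indegree []

def min_time_to_build (n : Int) (build_time : List Int) (graph : List (List Int)) (w : Int) : Int :=
  let order := topological_sort n graph
  let sub := order.foldl (fun sub i =>
    let sub1 := PySem.List.pySetD sub i (PySem.List.pyGetD sub i 0 + PySem.List.pyGetD build_time i 0)
    (PySem.List.pyGetD graph i []).foldl
      (fun s j => PySem.List.pySetD s j (max (PySem.List.pyGetD s j 0) (PySem.List.pyGetD s i 0))) sub1)
    (List.replicate (n+1).toNat 0)
  PySem.List.pyGetD sub w 0

-- ===== PORT B =====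
-- preds = [[] for _ in range(n+1)]; for i in 1..n: for j in graph[i]: preds[j].append(i)
def pvPreds (n : Int) (graph : List (List Int)) : List (List Int) :=
  (PySem.List.pyRange 1 (n+1) 1).foldl
    (fun pr i => (PySem.List.pyGetD graph i []).foldl
      (fun pr j => PySem.List.pySetD pr j (PySem.List.pyGetD pr j [] ++ [i])) pr)
    (List.replicate (n+1).toNat [])

-- val = [build_time[u] + max([0] + [val[p] for p in preds[u]]) for u in range(n+1)]
def pvRelax (n : Int) (build_time : List Int) (preds : List (List Int)) (val : List Int) : List Int :=
  (PySem.List.pyRange 0 (n+1) 1).map (fun u =>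
    PySem.List.pyGetD build_time u 0 +
      PySem.List.maxD ((0:Int) :: (PySem.List.pyGetD preds u []).map
        (fun p => PySem.List.pyGetD val p 0)) id 0)

def min_time_to_build_alt (n : Int) (build_time : List Int) (graph : List (List Int)) (w : Int) : Int :=
  let preds := pvPreds n graph
  let val := (List.range n.toNat).foldl (fun val _ => pvRelax n build_time preds val)
    (List.replicate (n+1).toNat 0)
  PySem.List.pyGetD val w 0

-- ===== PRECONDITION & SPEC =====
-- one step of the reachability-layer iteration used by Pre_'s acyclicity condition:
-- (pvWalkStep^[k] all-true).getD u = true  iff  some directed walk of length k ends at node u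
def pvWalkStep (n : Int) (graph : List (List Int)) (prev : List Bool) : List Bool :=
  (List.range (n+1).toNat).map (fun u =>
    (PySem.List.pyRange 1 (n+1) 1).any (fun p =>
      ((PySem.List.pyGetD graph p []).contains ((u:Nat):Int)) && prev.getD p.toNat false))

-- Pre_ restricts to the problem's natural domain (BOJ 1005 "ACM Craft"): buildings 1..n with
-- 1 ≤ w ≤ n, build_time and graph long enough to be indexed at 1..n, every edge target a
-- building 1..n, and an ACYCLIC dependency graph (no walk of length n ends at any node);
-- the degenerate n = 0 case (no buildings, A returns 0 without reading the graph) is kept,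
-- with the two w values Python accepts there.
-- It thereby also excludes some inputs on which A returns a value: cyclic graphs (A returns an
-- accidental partially-relaxed value, B a different fixed-point value — neither is a meaningful
-- build time), and w or edge targets that are 0 or negative (Python index-wraparound corners
-- outside the problem's node range); see the cited examples.
def Pre_min_time_to_build (n : Int) (build_time : List Int) (graph : List (List Int)) (w : Int) : Prop :=
  (n = 0 ∧ -1 ≤ w ∧ w ≤ 0) ∨
  (1 ≤ n ∧ n + 1 ≤ (build_time.length : Int) ∧ n + 1 ≤ (graph.length : Int) ∧
  (∀ i ∈ PySem.List.pyRange 1 (n+1) 1, ∀ j ∈ PySem.List.pyGetD graph i [],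
      j ∈ PySem.List.pyRange 1 (n+1) 1) ∧
  1 ≤ w ∧ w ≤ n ∧
  (∀ u ∈ PySem.List.pyRange 1 (n+1) 1,
      ((pvWalkStep n graph)^[n.toNat] (List.replicate (n+1).toNat true)).getD u.toNat false = false))
instance (n : Int) (build_time : List Int) (graph : List (List Int)) (w : Int) : Decidable (Pre_min_time_to_build n build_time graph w) := by unfold Pre_min_time_to_build; infer_instance

def pvWitness_min_time_to_build : Int × List Int × List (List Int) × Int := (2, [0, 3, 4], [[], [2], []], 1)

def Spec_min_time_to_build (n : Int) (build_time : List Int) (graph : List (List Int)) (w : Int) (out : Int) : Prop := out = min_time_to_build_alt n build_time graph w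
instance (n : Int) (build_time : List Int) (graph : List (List Int)) (w : Int) (out : Int) : Decidable (Spec_min_time_to_build n build_time graph w out) := by unfold Spec_min_time_to_build; infer_instance

-- ===== CLAIM (what is proved, stated in full; the proofs are below) =====
def Claim_equal_min_time_to_build : Prop := ∀ (n : Int) (build_time : List Int) (graph : List (List Int)) (w : Int), Dom_min_time_to_build n build_time graph w → Pre_min_time_to_build n build_time graph w → Spec_min_time_to_build n build_time graph w (min_time_to_build n build_time graph w)

-- ===== LEMMAS AND PROOFS =====

-- ---- generic helpers ----
theorem pv_getD_nonneg {α : Type} (xs : List α) {v : Int} (d : α) (hv : 0 ≤ v) :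
    PySem.List.pyGetD xs v d = xs.getD v.toNat d := by
  have h : v = ((v.toNat : Nat) : Int) := by omega
  rw [h, PySem.List.pyGetD_natCast]; congr 1

theorem pv_get_set {α : Type} (xs : List α) {j v : Int} (x d : α)
    (hj0 : 0 ≤ j) (hjL : j < (xs.length : Int)) (hv : 0 ≤ v) :
    PySem.List.pyGetD (PySem.List.pySetD xs j x) v d =
      if v = j then x else PySem.List.pyGetD xs v d := by
  rw [PySem.List.pySetD_of_nonneg xs x hj0, pv_getD_nonneg _ _ hv, pv_getD_nonneg _ _ hv]
  simp only [List.getD, List.getElem?_set]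
  have hjlen : j.toNat < xs.length := by omega
  by_cases hvj : v = j
  · subst hvj; simp [hjlen]
  · have hne : j.toNat ≠ v.toNat := by omega
    rw [if_neg hvj, if_neg hne]

theorem pv_getD_replicate {α : Type} (L : Nat) (c d : α) {v : Int} (hv : 0 ≤ v) (hL : v < (L : Int)) :
    PySem.List.pyGetD (List.replicate L c) v d = c := by
  rw [pv_getD_nonneg _ _ hv]
  have : v.toNat < L := by omega
  simp [List.getD, this]

theorem pv_getD_default {α : Type} (xs : List α) {v : Int} (d : α) (hv : (xs.length : Int) ≤ v) :
    PySem.List.pyGetD xs v d = d := by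
  have hv0 : 0 ≤ v := by
    have := Int.natCast_nonneg xs.length; omega
  rw [pv_getD_nonneg _ _ hv0]
  have : xs.length ≤ v.toNat := by omega
  simp [List.getD, List.getElem?_eq_none this]

def pvSumPos (xs : List Int) : Nat := (xs.map Int.toNat).sum

theorem pv_sum_set_nat (l : List Nat) (k : Nat) (a : Nat) (hk : k < l.length) :
    (l.set k a).sum + l[k] = l.sum + a := by
  induction l generalizing k with
  | nil => simp at hk
  | cons x xs ih =>
    cases k with
    | zero => simp [List.set]; omega
    | succ k =>
      simp only [List.set, List.sum_cons, List.getElem_cons_succ]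
      have := ih k (by simpa using hk)
      omega

theorem pv_sumPos_set_sub (xs : List Int) {j : Int} (h0 : 0 ≤ j) (hL : j < (xs.length : Int))
    (h1 : 1 ≤ PySem.List.pyGetD xs j 0) :
    pvSumPos (PySem.List.pySetD xs j (PySem.List.pyGetD xs j 0 - 1)) + 1 = pvSumPos xs := by
  have hjlen : j.toNat < xs.length := by omega
  rw [PySem.List.pySetD_of_nonneg xs _ h0]
  rw [pv_getD_nonneg _ _ h0] at h1 ⊢
  have hget : xs.getD j.toNat 0 = xs[j.toNat] := List.getD_eq_getElem xs 0 hjlen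
  rw [hget] at h1 ⊢
  unfold pvSumPos
  rw [List.map_set]
  have := pv_sum_set_nat (xs.map Int.toNat) j.toNat ((xs[j.toNat] - 1).toNat)
    (by simpa using hjlen)
  have hgetm : (xs.map Int.toNat)[j.toNat]'(by simpa using hjlen) = (xs[j.toNat]).toNat := by simp
  rw [hgetm] at this
  omega

theorem pv_sumPos_set_add (xs : List Int) {j : Int} (h0 : 0 ≤ j) (hL : j < (xs.length : Int))
    (hnn : 0 ≤ PySem.List.pyGetD xs j 0) :
    pvSumPos (PySem.List.pySetD xs j (PySem.List.pyGetD xs j 0 + 1)) = pvSumPos xs + 1 := by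
  have hjlen : j.toNat < xs.length := by omega
  rw [PySem.List.pySetD_of_nonneg xs _ h0]
  rw [pv_getD_nonneg _ _ h0] at hnn ⊢
  have hget : xs.getD j.toNat 0 = xs[j.toNat] := List.getD_eq_getElem xs 0 hjlen
  rw [hget] at hnn ⊢
  unfold pvSumPos
  rw [List.map_set]
  have := pv_sum_set_nat (xs.map Int.toNat) j.toNat ((xs[j.toNat] + 1).toNat)
    (by simpa using hjlen)
  have hgetm : (xs.map Int.toNat)[j.toNat]'(by simpa using hjlen) = (xs[j.toNat]).toNat := by simp
  rw [hgetm] at this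
  omega

theorem pv_foldl_max_le (l : List Int) (a b : Int) (ha : a ≤ b) (h : ∀ x ∈ l, x ≤ b) :
    l.foldl max a ≤ b := by
  induction l generalizing a with
  | nil => simpa
  | cons x xs ih =>
    simp only [List.foldl_cons]
    exact ih (max a x) (by have := h x (by simp); omega) (fun y hy => h y (by simp [hy]))

theorem pv_maxD_cons (l : List Int) (d : Int) :
    PySem.List.maxD ((0:Int) :: l) id d = l.foldl max 0 := by
  have key : ∀ (f : Option Int → Int → Option Int),
      (∀ x, f none x = some x) →
      (∀ m x, f (some m) x = some (max m x)) →
      ∀ (l : List Int) (a : Int), List.foldl f (f none a) l = some (l.foldl max a) := by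
    intro f hf0 hf l
    induction l with
    | nil => intro a; rw [hf0]; rfl
    | cons x xs ih =>
      intro a
      rw [hf0, List.foldl_cons, hf, List.foldl_cons, ← hf0 (max a x)]
      exact ih (max a x)
  unfold PySem.List.maxD PySem.List.max?
  rw [List.foldl_cons, key _ (fun x => rfl) ?hf l 0]
  · rfl
  case hf =>
    intro m x
    show (if id m < id x then some x else some m) = some (max m x)
    simp only [id]
    split_ifs with h
    · rw [max_eq_right (le_of_lt h)]
    · rw [max_eq_left (not_lt.mp h)]

theorem pv_sum_single (l : List Int) (f g : Int → Int) (u : Int)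
    (hn : l.Nodup) (hu : u ∈ l) (h : ∀ p ∈ l, p ≠ u → f p = g p) :
    (l.map f).sum = (l.map g).sum + (f u - g u) := by
  induction l with
  | nil => simp at hu
  | cons x xs ih =>
    simp only [List.map_cons, List.sum_cons]
    rcases List.mem_cons.1 hu with rfl | hu'
    · have hnot : u ∉ xs := (List.nodup_cons.1 hn).1
      have : ∀ p ∈ xs, f p = g p := fun p hp =>
        h p (by simp [hp]) (fun e => hnot (e ▸ hp))
      rw [List.map_congr_left this]; ring
    · have hx : x ≠ u := fun e => (List.nodup_cons.1 hn).1 (e ▸ hu')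
      rw [h x (by simp) hx, ih (List.nodup_cons.1 hn).2 hu'
        (fun p hp hpu => h p (by simp [hp]) hpu)]
      ring

-- ---- graph notions ----
def pvEdge (n : Int) (graph : List (List Int)) (p u : Int) : Prop :=
  p ∈ PySem.List.pyRange 1 (n+1) 1 ∧ u ∈ PySem.List.pyGetD graph p []

def pvWalk (n : Int) (graph : List (List Int)) : Nat → Int → Prop
  | 0, _ => True
  | k+1, u => ∃ p, pvEdge n graph p u ∧ pvWalk n graph k p

def pvRem (n : Int) (graph : List (List Int)) (done : List Int) (v : Int) : Int :=
  ((PySem.List.pyRange 1 (n+1) 1).map (fun p =>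
    if done.contains p then 0 else ((PySem.List.pyGetD graph p []).count v : Int))).sum

theorem pvRem_nonneg (n : Int) (graph : List (List Int)) (done : List Int) (v : Int) :
    0 ≤ pvRem n graph done v := by
  apply List.sum_nonneg
  intro x hx
  obtain ⟨p, _, rfl⟩ := List.mem_map.1 hx
  split_ifs <;> positivity

theorem pvRem_append (n : Int) (graph : List (List Int)) (done : List Int) {u : Int} (v : Int)
    (hu : u ∈ PySem.List.pyRange 1 (n+1) 1) (hnd : u ∉ done) :
    pvRem n graph (done ++ [u]) v =
      pvRem n graph done v - ((PySem.List.pyGetD graph u []).count v : Int) := by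
  unfold pvRem
  rw [pv_sum_single _ _ (fun p => if done.contains p then 0 else ((PySem.List.pyGetD graph p []).count v : Int)) u
    (PySem.List.nodup_pyRange_one 1 (n+1)) hu ?hcong]
  · have h1 : (done ++ [u]).contains u = true := by simp
    have h2 : done.contains u = false := by simpa using hnd
    rw [h1, h2]
    simp only [if_true, if_false, Bool.true_eq_false, Bool.false_eq_true]
    ring
  case hcong =>
    intro p hp hpu
    have h3 : (done ++ [u]).contains p = done.contains p := by
      simp [hpu]
    simp only [h3]

theorem pvRem_ge_count (n : Int) (graph : List (List Int)) (done : List Int) {u : Int} (v : Int)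
    (hu : u ∈ PySem.List.pyRange 1 (n+1) 1) (hnd : u ∉ done) :
    ((PySem.List.pyGetD graph u []).count v : Int) ≤ pvRem n graph done v := by
  have hmem : (if done.contains u then 0 else ((PySem.List.pyGetD graph u []).count v : Int)) ∈
      (PySem.List.pyRange 1 (n+1) 1).map (fun p =>
        if done.contains p then 0 else ((PySem.List.pyGetD graph p []).count v : Int)) :=
    List.mem_map.2 ⟨u, hu, rfl⟩
  have hnn : ∀ x ∈ (PySem.List.pyRange 1 (n+1) 1).map (fun p =>
      if done.contains p then 0 else ((PySem.List.pyGetD graph p []).count v : Int)), 0 ≤ x := by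
    intro x hx
    obtain ⟨p, _, rfl⟩ := List.mem_map.1 hx
    split_ifs <;> positivity
  have hle := List.single_le_sum hnn _ hmem
  have h2 : done.contains u = false := by simpa using hnd
  rw [h2] at hle
  unfold pvRem
  simpa using hle

theorem pvRem_zero_preds (n : Int) (graph : List (List Int)) (done : List Int) {v : Int}
    (hz : pvRem n graph done v = 0) {p : Int} (hp : pvEdge n graph p v) : p ∈ done := by
  by_contra hnd
  have hge := pvRem_ge_count n graph done v hp.1 hnd
  have hpos : 0 < (PySem.List.pyGetD graph p []).count v := List.count_pos_iff.2 hp.2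
  omega

theorem pvRem_pos_pred (n : Int) (graph : List (List Int)) (done : List Int) {v : Int}
    (hpos : pvRem n graph done v ≠ 0) : ∃ p, pvEdge n graph p v ∧ p ∉ done := by
  by_contra h
  push_neg at h
  apply hpos
  apply List.sum_eq_zero
  intro x hx
  obtain ⟨p, hp, rfl⟩ := List.mem_map.1 hx
  by_cases hc : done.contains p = true
  · rw [if_pos hc]
  · rw [if_neg hc]
    have : v ∉ PySem.List.pyGetD graph p [] := by
      intro hv
      exact (by simpa using hc : p ∉ done) (h p ⟨hp, hv⟩)
    simp [List.count_eq_zero.2 this]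

-- ---- bridge: Pre_'s layer iteration ↔ pvWalk ----
theorem pv_walk_bridge (n : Int) (graph : List (List Int)) (k : Nat) (u : Nat)
    (hu : u < (n+1).toNat) :
    (((pvWalkStep n graph)^[k] (List.replicate (n+1).toNat true)).getD u false = true ↔
      pvWalk n graph k (u : Int)) := by
  induction k generalizing u with
  | zero =>
    simp only [Function.iterate_zero, id]
    constructor
    · intro _; trivial
    · intro _
      rw [List.getD_eq_getElem _ _ (by simpa using hu)]
      simp
  | succ k ih =>
    rw [Function.iterate_succ_apply']
    unfold pvWalkStep
    rw [PySem.List.getD_map_range _ _ _ _ hu]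
    rw [List.any_eq_true]
    constructor
    · rintro ⟨p, hp, hb⟩
      rw [Bool.and_eq_true] at hb
      have hp1 : 1 ≤ p ∧ p < n + 1 := (PySem.List.mem_pyRange_one).1 hp
      have hcast : ((p.toNat : Nat) : Int) = p := by omega
      have hwp := (ih p.toNat (by omega)).1 hb.2
      rw [hcast] at hwp
      exact ⟨p, ⟨hp, by simpa using hb.1⟩, hwp⟩
    · rintro ⟨p, ⟨hp, hmem⟩, hw⟩
      refine ⟨p, hp, ?_⟩
      rw [Bool.and_eq_true]
      have hp1 : 1 ≤ p ∧ p < n + 1 := (PySem.List.mem_pyRange_one).1 hp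
      have hcast : ((p.toNat : Nat) : Int) = p := by omega
      constructor
      · simpa using hmem
      · exact (ih p.toNat (by omega)).2 (by rw [hcast]; exact hw)

theorem pv_acyc (n : Int) (graph : List (List Int))
    (hrows : ∀ i ∈ PySem.List.pyRange 1 (n+1) 1, ∀ j ∈ PySem.List.pyGetD graph i [],
      j ∈ PySem.List.pyRange 1 (n+1) 1)
    (h : ∀ u ∈ PySem.List.pyRange 1 (n+1) 1,
      ((pvWalkStep n graph)^[n.toNat] (List.replicate (n+1).toNat true)).getD u.toNat false = false)
    (hn : 1 ≤ n) :
    ∀ u : Int, 0 ≤ u → u < n + 1 → ¬ pvWalk n graph n.toNat u := by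
  intro u hu0 huL hw
  by_cases h1 : 1 ≤ u
  · have hmem : u ∈ PySem.List.pyRange 1 (n+1) 1 := PySem.List.mem_pyRange_one.2 ⟨h1, huL⟩
    have hfalse := h u hmem
    have hcast : ((u.toNat : Nat) : Int) = u := by omega
    have := (pv_walk_bridge n graph n.toNat u.toNat (by omega)).2 (by rw [hcast]; exact hw)
    rw [hfalse] at this
    exact Bool.false_ne_true this
  · -- u = 0: no edge can end at 0 since all edge targets lie in 1..n
    have hu : u = 0 := by omega
    subst hu
    obtain ⟨m, hm⟩ : ∃ m, n.toNat = m + 1 := ⟨n.toNat - 1, by omega⟩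
    rw [hm] at hw
    obtain ⟨p, ⟨hp, hmem⟩, _⟩ := hw
    have := hrows p hp 0 hmem
    have := (PySem.List.mem_pyRange_one).1 this
    omega

-- ---- B-side: preds characterization, value function ----
def pvValF (n : Int) (build_time : List Int) (graph : List (List Int)) (k : Nat) : List Int :=
  (List.range k).foldl (fun val _ => pvRelax n build_time (pvPreds n graph) val)
    (List.replicate (n+1).toNat 0)

def pvV (n : Int) (build_time : List Int) (graph : List (List Int)) (u : Int) : Int :=
  PySem.List.pyGetD (pvValF n build_time graph n.toNat) u 0

-- appending i at index j for every j in row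
theorem pv_appendFold {α : Type} (i : α) :
    ∀ (row : List Int) (pr : List (List α)),
    (∀ j ∈ row, 0 ≤ j ∧ j < (pr.length : Int)) →
    (let r := row.foldl (fun pr j => PySem.List.pySetD pr j (PySem.List.pyGetD pr j [] ++ [i])) pr
     r.length = pr.length ∧ ∀ v : Int, 0 ≤ v →
       PySem.List.pyGetD r v [] = PySem.List.pyGetD pr v [] ++ List.replicate (row.count v) i) := by
  intro row
  induction row with
  | nil => intro pr _; exact ⟨rfl, fun v _ => by simp⟩
  | cons j0 rest ih =>
    intro pr hval
    obtain ⟨hj0, hj0L⟩ := hval j0 (by simp)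
    set pr1 := PySem.List.pySetD pr j0 (PySem.List.pyGetD pr j0 [] ++ [i]) with hpr1
    have hlen1 : pr1.length = pr.length := PySem.List.length_pySetD _ _ _
    obtain ⟨hlen, hget⟩ := ih pr1 (by
      intro j hj
      have h := hval j (by simp [hj])
      exact ⟨h.1, by rw [hlen1]; exact h.2⟩)
    refine ⟨by simpa [hlen1] using hlen, ?_⟩
    intro v hv
    have hr : (j0 :: rest).foldl
        (fun pr j => PySem.List.pySetD pr j (PySem.List.pyGetD pr j [] ++ [i])) pr =
        rest.foldl (fun pr j => PySem.List.pySetD pr j (PySem.List.pyGetD pr j [] ++ [i])) pr1 := by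
      rw [List.foldl_cons]
    rw [hr, hget v hv, hpr1, pv_get_set _ _ _ hj0 hj0L hv]
    by_cases hvj : v = j0
    · subst hvj
      rw [if_pos rfl, List.count_cons_self, List.append_assoc, List.singleton_append,
        ← List.replicate_succ]
    · rw [if_neg hvj, List.count_cons_of_ne (fun h => hvj h.symm)]

theorem pv_predsFold (n : Int) (graph : List (List Int)) :
    ∀ (ps : List Int) (pr : List (List Int)),
    (∀ p ∈ ps, ∀ j ∈ PySem.List.pyGetD graph p [], 0 ≤ j ∧ j < (pr.length : Int)) →
    (let r := ps.foldl (fun pr i => (PySem.List.pyGetD graph i []).foldl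
        (fun pr j => PySem.List.pySetD pr j (PySem.List.pyGetD pr j [] ++ [i])) pr) pr
     r.length = pr.length ∧ ∀ v : Int, 0 ≤ v → ∀ x : Int,
       (x ∈ PySem.List.pyGetD r v [] ↔ x ∈ PySem.List.pyGetD pr v [] ∨
         (x ∈ ps ∧ v ∈ PySem.List.pyGetD graph x []))) := by
  intro ps
  induction ps with
  | nil => intro pr _; exact ⟨rfl, fun v _ x => by simp⟩
  | cons p0 rest ih =>
    intro pr hval
    obtain ⟨hlen1, hget1⟩ := pv_appendFold p0 (PySem.List.pyGetD graph p0 []) pr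
      (fun j hj => hval p0 (by simp) j hj)
    set pr1 := (PySem.List.pyGetD graph p0 []).foldl
      (fun pr j => PySem.List.pySetD pr j (PySem.List.pyGetD pr j [] ++ [p0])) pr with hpr1
    obtain ⟨hlen, hget⟩ := ih pr1 (by
      intro p hp j hj
      have h := hval p (by simp [hp]) j hj
      exact ⟨h.1, by rw [hlen1]; exact h.2⟩)
    refine ⟨by simpa [hlen1] using hlen, ?_⟩
    intro v hv x
    rw [List.foldl_cons, hget v hv x, hget1 v hv]
    simp only [List.mem_append, List.mem_replicate, List.mem_cons]
    constructor
    · rintro ((h | ⟨hc, rfl⟩) | ⟨hx, hvrow⟩)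
      · exact Or.inl h
      · exact Or.inr ⟨Or.inl rfl, List.count_pos_iff.1 (by omega)⟩
      · exact Or.inr ⟨Or.inr hx, hvrow⟩
    · rintro (h | ⟨(rfl | hx), hvrow⟩)
      · exact Or.inl (Or.inl h)
      · exact Or.inl (Or.inr ⟨by have := List.count_pos_iff.2 hvrow; omega, rfl⟩)
      · exact Or.inr ⟨hx, hvrow⟩

theorem pvPreds_len (n : Int) (graph : List (List Int))
    (hrows : ∀ i ∈ PySem.List.pyRange 1 (n+1) 1, ∀ j ∈ PySem.List.pyGetD graph i [],
      j ∈ PySem.List.pyRange 1 (n+1) 1) (hn : 1 ≤ n) :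
    (pvPreds n graph).length = (n+1).toNat := by
  obtain ⟨hlen, _⟩ := pv_predsFold n graph (PySem.List.pyRange 1 (n+1) 1)
    (List.replicate (n+1).toNat []) (by
      intro p hp j hj
      have := (PySem.List.mem_pyRange_one).1 (hrows p hp j hj)
      constructor <;> [omega; (simp; omega)])
  simpa using hlen

theorem pv_mem_preds (n : Int) (graph : List (List Int))
    (hrows : ∀ i ∈ PySem.List.pyRange 1 (n+1) 1, ∀ j ∈ PySem.List.pyGetD graph i [],
      j ∈ PySem.List.pyRange 1 (n+1) 1) (hn : 1 ≤ n)
    {u : Int} (hu0 : 0 ≤ u) (p : Int) :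
    p ∈ PySem.List.pyGetD (pvPreds n graph) u [] ↔ pvEdge n graph p u := by
  obtain ⟨hlen, hget⟩ := pv_predsFold n graph (PySem.List.pyRange 1 (n+1) 1)
    (List.replicate (n+1).toNat []) (by
      intro q hq j hj
      have := (PySem.List.mem_pyRange_one).1 (hrows q hq j hj)
      constructor <;> [omega; (simp; omega)])
  by_cases huL : u < n + 1
  · have h := hget u hu0 p
    unfold pvPreds
    rw [h]
    rw [pv_getD_replicate _ _ _ hu0 (by simp; omega)]
    simp [pvEdge]
  · have hL : ((pvPreds n graph).length : Int) ≤ u := by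
      rw [pvPreds_len n graph hrows hn]; omega
    rw [pv_getD_default _ _ hL]
    simp only [List.not_mem_nil, false_iff]
    rintro ⟨hp, hmem⟩
    have := (PySem.List.mem_pyRange_one).1 (hrows p hp u hmem)
    omega

theorem pvValF_succ (n : Int) (build_time : List Int) (graph : List (List Int)) (k : Nat) :
    pvValF n build_time graph (k+1) =
      pvRelax n build_time (pvPreds n graph) (pvValF n build_time graph k) := by
  unfold pvValF
  rw [List.range_succ, List.foldl_append]
  rfl

theorem pvValF_succ_get (n : Int) (build_time : List Int) (graph : List (List Int)) (k : Nat)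
    {u : Int} (hu0 : 0 ≤ u) (huL : u < n + 1) :
    PySem.List.pyGetD (pvValF n build_time graph (k+1)) u 0 =
      PySem.List.pyGetD build_time u 0 +
        ((PySem.List.pyGetD (pvPreds n graph) u []).map
          (fun p => PySem.List.pyGetD (pvValF n build_time graph k) p 0)).foldl max 0 := by
  rw [pvValF_succ]
  unfold pvRelax
  rw [PySem.List.pyGetD_map_pyRange_of_nonneg _ (n+1) u 0 hu0 huL, pv_maxD_cons]

theorem pvValF_stab (n : Int) (build_time : List Int) (graph : List (List Int))
    (hrows : ∀ i ∈ PySem.List.pyRange 1 (n+1) 1, ∀ j ∈ PySem.List.pyGetD graph i [],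
      j ∈ PySem.List.pyRange 1 (n+1) 1) (hn : 1 ≤ n) :
    ∀ (m : Nat) (u : Int), 0 ≤ u → u < n + 1 → ¬ pvWalk n graph m u →
      ∀ f g : Nat, m ≤ f → m ≤ g →
        PySem.List.pyGetD (pvValF n build_time graph f) u 0 =
        PySem.List.pyGetD (pvValF n build_time graph g) u 0 := by
  intro m
  induction m with
  | zero => intro u _ _ hw; exact absurd trivial hw
  | succ m ih =>
    intro u hu0 huL hw f g hf hg
    obtain ⟨f', rfl⟩ : ∃ f', f = f' + 1 := ⟨f - 1, by omega⟩
    obtain ⟨g', rfl⟩ : ∃ g', g = g' + 1 := ⟨g - 1, by omega⟩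
    rw [pvValF_succ_get n build_time graph f' hu0 huL,
      pvValF_succ_get n build_time graph g' hu0 huL]
    congr 1
    congr 1
    apply List.map_congr_left
    intro p hp
    have hedge : pvEdge n graph p u := (pv_mem_preds n graph hrows hn hu0 p).1 hp
    have hpb := (PySem.List.mem_pyRange_one).1 hedge.1
    have hwp : ¬ pvWalk n graph m p := fun hwp => hw ⟨p, hedge, hwp⟩
    exact ih p (by omega) (by omega) hwp f' g' (by omega) (by omega)

theorem pvV_rec (n : Int) (build_time : List Int) (graph : List (List Int))
    (hrows : ∀ i ∈ PySem.List.pyRange 1 (n+1) 1, ∀ j ∈ PySem.List.pyGetD graph i [],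
      j ∈ PySem.List.pyRange 1 (n+1) 1) (hn : 1 ≤ n)
    {u : Int} (hu0 : 0 ≤ u) (huL : u < n + 1) (hw : ¬ pvWalk n graph n.toNat u) :
    pvV n build_time graph u =
      PySem.List.pyGetD build_time u 0 +
        ((PySem.List.pyGetD (pvPreds n graph) u []).map
          (fun p => pvV n build_time graph p)).foldl max 0 := by
  unfold pvV
  rw [pvValF_stab n build_time graph hrows hn n.toNat u hu0 huL hw n.toNat (n.toNat + 1)
    (le_refl _) (by omega)]
  rw [pvValF_succ_get n build_time graph n.toNat hu0 huL]

-- ---- A-side: initial indegree, queue ----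
theorem pv_incFold :
    ∀ (row : List Int) (ind : List Int),
    (∀ j ∈ row, 0 ≤ j ∧ j < (ind.length : Int)) →
    (∀ v : Int, 0 ≤ v → 0 ≤ PySem.List.pyGetD ind v 0) →
    (let r := row.foldl (fun ind j => PySem.List.pySetD ind j (PySem.List.pyGetD ind j 0 + 1)) ind
     r.length = ind.length ∧
     (∀ v : Int, 0 ≤ v → PySem.List.pyGetD r v 0 = PySem.List.pyGetD ind v 0 + (row.count v : Int)) ∧
     pvSumPos r ≤ pvSumPos ind + row.length ∧
     (∀ v : Int, 0 ≤ v → 0 ≤ PySem.List.pyGetD r v 0)) := by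
  intro row
  induction row with
  | nil => intro ind _ hnn; exact ⟨rfl, fun v _ => by simp, by simp [le_refl], hnn⟩
  | cons j0 rest ih =>
    intro ind hval hnn
    obtain ⟨hj00, hj0L⟩ := hval j0 (by simp)
    set ind1 := PySem.List.pySetD ind j0 (PySem.List.pyGetD ind j0 0 + 1) with hind1
    have hlen1 : ind1.length = ind.length := PySem.List.length_pySetD _ _ _
    have hget1 : ∀ v : Int, 0 ≤ v →
        PySem.List.pyGetD ind1 v 0 = if v = j0 then PySem.List.pyGetD ind j0 0 + 1
          else PySem.List.pyGetD ind v 0 :=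
      fun v hv => pv_get_set ind _ 0 hj00 hj0L hv
    have hnn1 : ∀ v : Int, 0 ≤ v → 0 ≤ PySem.List.pyGetD ind1 v 0 := by
      intro v hv
      rw [hget1 v hv]
      split_ifs with h
      · have := hnn j0 hj00; omega
      · exact hnn v hv
    have hsum1 : pvSumPos ind1 = pvSumPos ind + 1 :=
      pv_sumPos_set_add ind hj00 hj0L (hnn j0 hj00)
    obtain ⟨hLen, hPt, hSum, hNN⟩ := ih ind1
      (fun j hj => ⟨(hval j (by simp [hj])).1, by rw [hlen1]; exact (hval j (by simp [hj])).2⟩) hnn1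
    refine ⟨by rw [List.foldl_cons]; exact hLen.trans hlen1, ?_, ?_, ?_⟩
    · intro v hv
      rw [List.foldl_cons, hPt v hv, hget1 v hv]
      by_cases hvv : v = j0
      · subst hvv
        rw [if_pos rfl, List.count_cons_self]
        push_cast; ring
      · rw [if_neg hvv, List.count_cons_of_ne (fun h => hvv h.symm)]
    · rw [List.foldl_cons]
      calc pvSumPos _ ≤ pvSumPos ind1 + rest.length := hSum
        _ = pvSumPos ind + (j0 :: rest).length := by rw [hsum1]; simp; omega
        _ ≤ _ := le_refl _
    · intro v hv; rw [List.foldl_cons]; exact hNN v hv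

theorem pv_initFold (graph : List (List Int)) :
    ∀ (ps : List Int) (ind : List Int),
    (∀ p ∈ ps, ∀ j ∈ PySem.List.pyGetD graph p [], 0 ≤ j ∧ j < (ind.length : Int)) →
    (∀ v : Int, 0 ≤ v → 0 ≤ PySem.List.pyGetD ind v 0) →
    (let r := ps.foldl (fun ind i => (PySem.List.pyGetD graph i []).foldl
        (fun ind j => PySem.List.pySetD ind j (PySem.List.pyGetD ind j 0 + 1)) ind) ind
     r.length = ind.length ∧
     (∀ v : Int, 0 ≤ v → PySem.List.pyGetD r v 0 = PySem.List.pyGetD ind v 0 +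
        (ps.map (fun p => ((PySem.List.pyGetD graph p []).count v : Int))).sum) ∧
     pvSumPos r ≤ pvSumPos ind + (ps.map (fun p => (PySem.List.pyGetD graph p []).length)).sum) := by
  intro ps
  induction ps with
  | nil => intro ind _ _; exact ⟨rfl, fun v _ => by simp, by simp⟩
  | cons p0 rest ih =>
    intro ind hval hnn
    obtain ⟨hLen1, hPt1, hSum1, hNN1⟩ := pv_incFold (PySem.List.pyGetD graph p0 []) ind
      (fun j hj => hval p0 (by simp) j hj) hnn
    set ind1 := (PySem.List.pyGetD graph p0 []).foldl
      (fun ind j => PySem.List.pySetD ind j (PySem.List.pyGetD ind j 0 + 1)) ind with hind1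
    obtain ⟨hLen, hPt, hSum⟩ := ih ind1
      (fun p hp j hj => ⟨(hval p (by simp [hp]) j hj).1, by
        rw [hLen1]; exact (hval p (by simp [hp]) j hj).2⟩) hNN1
    refine ⟨by rw [List.foldl_cons]; exact hLen.trans hLen1, ?_, ?_⟩
    · intro v hv
      rw [List.foldl_cons, hPt v hv, hPt1 v hv]
      simp only [List.map_cons, List.sum_cons]
      ring
    · rw [List.foldl_cons, ← hind1]
      simp only [List.map_cons, List.sum_cons]
      omega

theorem pv_indegree_init (n : Int) (graph : List (List Int))
    (hrows : ∀ i ∈ PySem.List.pyRange 1 (n+1) 1, ∀ j ∈ PySem.List.pyGetD graph i [],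
      j ∈ PySem.List.pyRange 1 (n+1) 1) (hn : 1 ≤ n) :
    (let ind := (PySem.List.pyRange 1 (n+1) 1).foldl
      (fun ind i => (PySem.List.pyGetD graph i []).foldl
        (fun ind j => PySem.List.pySetD ind j (PySem.List.pyGetD ind j 0 + 1)) ind)
      (List.replicate (n+1).toNat 0)
     ind.length = (n+1).toNat ∧ (∀ v : Int, 0 ≤ v → PySem.List.pyGetD ind v 0 = pvRem n graph [] v) ∧
      pvSumPos ind ≤ pvGraphSize n graph) := by
  have hget0 : ∀ v : Int, 0 ≤ v → PySem.List.pyGetD (List.replicate (n+1).toNat (0:Int)) v 0 = 0 := by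
    intro v hv
    by_cases hL : v < ((n+1).toNat : Int)
    · exact pv_getD_replicate _ _ _ hv hL
    · exact pv_getD_default _ _ (by simpa using hL)
  obtain ⟨hLen, hPt, hSum⟩ := pv_initFold graph (PySem.List.pyRange 1 (n+1) 1)
    (List.replicate (n+1).toNat 0)
    (by
      intro p hp j hj
      have := (PySem.List.mem_pyRange_one).1 (hrows p hp j hj)
      constructor
      · omega
      · simp only [List.length_replicate]; omega)
    (fun v hv => by rw [hget0 v hv])
  refine ⟨by simpa using hLen, ?_, ?_⟩
  · intro v hv
    rw [hPt v hv, hget0 v hv]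
    unfold pvRem
    have : ∀ p ∈ PySem.List.pyRange 1 (n+1) 1,
        (if ([] : List Int).contains p then 0 else ((PySem.List.pyGetD graph p []).count v : Int)) =
        ((PySem.List.pyGetD graph p []).count v : Int) := by
      intro p _; rfl
    rw [List.map_congr_left this]
    ring
  · have hz : pvSumPos (List.replicate (n+1).toNat (0:Int)) = 0 := by
      unfold pvSumPos
      simp [List.map_replicate]
    rw [hz] at hSum
    simpa [pvGraphSize] using hSum

-- ---- A-side: the Kahn loop ----
def pvINV (n : Int) (graph : List (List Int)) (done q ind : List Int) : Prop :=
  ind.length = (n+1).toNat ∧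
  (done ++ q).Nodup ∧
  (∀ x ∈ done ++ q, x ∈ PySem.List.pyRange 1 (n+1) 1) ∧
  (∀ v : Int, 0 ≤ v → PySem.List.pyGetD ind v 0 = pvRem n graph done v) ∧
  (∀ u ∈ PySem.List.pyRange 1 (n+1) 1, pvRem n graph done u = 0 → u ∈ done ++ q) ∧
  (∀ x ∈ q, pvRem n graph done x = 0) ∧
  (∀ x ∈ done, pvRem n graph done x = 0) ∧
  (∀ (k : Nat) (hk : k < done.length), ∀ p, pvEdge n graph p done[k] → p ∈ done.take k)

theorem pv_stepFold :
    ∀ (row q ind : List Int),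
    q.Nodup →
    (∀ x ∈ q, 0 ≤ x) →
    (∀ x ∈ q, PySem.List.pyGetD ind x 0 = 0) →
    (∀ v ∈ row, 0 ≤ v ∧ v < (ind.length : Int)) →
    (∀ v ∈ row, (row.count v : Int) ≤ PySem.List.pyGetD ind v 0) →
    (let r := row.foldl (fun (s : List Int × List Int) v =>
        let ind2 := PySem.List.pySetD s.2 v (PySem.List.pyGetD s.2 v 0 - 1)
        if PySem.List.pyGetD ind2 v 0 = 0 then (s.1 ++ [v], ind2) else (s.1, ind2)) (q, ind)
     r.2.length = ind.length ∧
     (∀ v : Int, 0 ≤ v → PySem.List.pyGetD r.2 v 0 = PySem.List.pyGetD ind v 0 - (row.count v : Int)) ∧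
     (∀ x, x ∈ r.1 ↔ x ∈ q ∨ (x ∈ row ∧ PySem.List.pyGetD ind x 0 = (row.count x : Int))) ∧
     r.1.Nodup ∧
     r.1.length + pvSumPos r.2 ≤ q.length + pvSumPos ind) := by
  intro row
  induction row with
  | nil =>
    intro q ind hnodup _ hqz _ _
    exact ⟨rfl, fun v _ => by simp, fun x => by simp, hnodup, le_refl _⟩
  | cons v0 rest ih =>
    intro q ind hnodup hq0 hqz hval hcount
    obtain ⟨hv00, hv0L⟩ := hval v0 (by simp)
    have hcnt0 : ((v0 :: rest).count v0 : Int) = (rest.count v0 : Int) + 1 := by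
      rw [List.count_cons_self]; push_cast; ring
    have hc1 : 1 ≤ PySem.List.pyGetD ind v0 0 := by
      have h := hcount v0 (by simp)
      have : (0:Int) ≤ (rest.count v0 : Int) := by positivity
      omega
    set g0 := PySem.List.pyGetD ind v0 0 with hg0
    set ind1 := PySem.List.pySetD ind v0 (g0 - 1) with hind1
    have hlen1 : ind1.length = ind.length := PySem.List.length_pySetD _ _ _
    have hget1 : ∀ v : Int, 0 ≤ v →
        PySem.List.pyGetD ind1 v 0 = if v = v0 then g0 - 1 else PySem.List.pyGetD ind v 0 :=
      fun v hv => pv_get_set ind (g0 - 1) 0 hv00 hv0L hv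
    have hgv0 : PySem.List.pyGetD ind1 v0 0 = g0 - 1 := by rw [hget1 v0 hv00, if_pos rfl]
    have hsum1 : pvSumPos ind1 + 1 = pvSumPos ind := pv_sumPos_set_sub ind hv00 hv0L hc1
    have hcountrest : ∀ v ∈ rest, (rest.count v : Int) ≤ PySem.List.pyGetD ind1 v 0 := by
      intro v hv
      rw [hget1 v (hval v (by simp [hv])).1]
      by_cases hvv : v = v0
      · subst hvv
        have h2 := hcount v (by simp)
        rw [if_pos rfl]
        omega
      · rw [if_neg hvv]
        have h2 := hcount v (by simp [hv])
        have h3 : (v0 :: rest).count v = rest.count v := List.count_cons_of_ne (fun h => hvv h.symm)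
        omega
    have hvalrest : ∀ v ∈ rest, 0 ≤ v ∧ v < (ind1.length : Int) := by
      intro v hv; have := hval v (by simp [hv]); omega
    have hcountne : ∀ x : Int, x ≠ v0 → (v0 :: rest).count x = rest.count x :=
      fun x hx => List.count_cons_of_ne (fun h => hx h.symm)
    by_cases hc : g0 = 1
    -- the decrement reaches 0: v0 is enqueued
    · have hv0q : v0 ∉ q := fun h => by have := hqz v0 h; omega
      have hstep : (v0 :: rest).foldl (fun (s : List Int × List Int) v =>
          let ind2 := PySem.List.pySetD s.2 v (PySem.List.pyGetD s.2 v 0 - 1)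
          if PySem.List.pyGetD ind2 v 0 = 0 then (s.1 ++ [v], ind2) else (s.1, ind2)) (q, ind) =
          rest.foldl (fun (s : List Int × List Int) v =>
          let ind2 := PySem.List.pySetD s.2 v (PySem.List.pyGetD s.2 v 0 - 1)
          if PySem.List.pyGetD ind2 v 0 = 0 then (s.1 ++ [v], ind2) else (s.1, ind2)) (q ++ [v0], ind1) := by
        rw [List.foldl_cons]
        congr 1
        show (if PySem.List.pyGetD ind1 v0 0 = 0 then (q ++ [v0], ind1) else (q, ind1)) = _
        rw [if_pos (by omega)]
      rw [hstep]
      -- rest count bound forces rest.count v0 = 0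
      have hrest0 : (rest.count v0 : Int) = 0 := by
        by_cases hv0r : v0 ∈ rest
        · have := hcountrest v0 hv0r; omega
        · simp [List.count_eq_zero.2 hv0r]
      have hnodup1 : (q ++ [v0]).Nodup := by
        simp [List.nodup_append, hnodup]
        exact fun a ha h => hv0q (h ▸ ha)
      have hq01 : ∀ x ∈ q ++ [v0], 0 ≤ x := by
        intro x hx
        rcases List.mem_append.1 hx with hx | hx
        · exact hq0 x hx
        · simp at hx; omega
      have hqz1 : ∀ x ∈ q ++ [v0], PySem.List.pyGetD ind1 x 0 = 0 := by
        intro x hx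
        rcases List.mem_append.1 hx with hx | hx
        · have hx0 := hqz x hx
          have hxv0 : x ≠ v0 := fun h => by rw [h] at hx0; omega
          rw [hget1 x (hq0 x hx), if_neg hxv0]; exact hx0
        · simp at hx; subst hx; omega
      obtain ⟨hLen, hPt, hMem, hNd, hBud⟩ := ih (q ++ [v0]) ind1 hnodup1 hq01 hqz1 hvalrest hcountrest
      refine ⟨hLen.trans hlen1, ?_, ?_, hNd, ?_⟩
      · intro v hv
        rw [hPt v hv, hget1 v hv]
        by_cases hvv : v = v0
        · subst hvv; rw [if_pos rfl, hcnt0]; ring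
        · rw [if_neg hvv, hcountne v hvv]
      · intro x
        rw [hMem x]
        constructor
        · rintro (hx | ⟨hxr, hxe⟩)
          · rcases List.mem_append.1 hx with hx | hx
            · exact Or.inl hx
            · simp at hx
              refine Or.inr ⟨by rw [hx]; simp, ?_⟩
              rw [hx, hcnt0]
              omega
          · by_cases hxv0 : x = v0
            · refine Or.inr ⟨by rw [hxv0]; simp, ?_⟩
              rw [hget1 x (hvalrest x hxr).1, if_pos hxv0] at hxe
              rw [hxv0, hcnt0]
              omega
            · rw [hget1 x (hvalrest x hxr).1, if_neg hxv0] at hxe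
              exact Or.inr ⟨by simp [hxr], by rw [hcountne x hxv0]; exact hxe⟩
        · rintro (hx | ⟨hxr, hxe⟩)
          · exact Or.inl (by simp [hx])
          · by_cases hxv0 : x = v0
            · subst hxv0; exact Or.inl (by simp)
            · rcases List.mem_cons.1 hxr with h | hxrest
              · exact absurd h hxv0
              · refine Or.inr ⟨hxrest, ?_⟩
                rw [hget1 x (hvalrest x hxrest).1, if_neg hxv0, ← hcountne x hxv0]
                exact hxe
      · have : (q ++ [v0]).length = q.length + 1 := by simp
        omega
    -- the decrement does not reach 0
    · have hstep : (v0 :: rest).foldl (fun (s : List Int × List Int) v =>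
          let ind2 := PySem.List.pySetD s.2 v (PySem.List.pyGetD s.2 v 0 - 1)
          if PySem.List.pyGetD ind2 v 0 = 0 then (s.1 ++ [v], ind2) else (s.1, ind2)) (q, ind) =
          rest.foldl (fun (s : List Int × List Int) v =>
          let ind2 := PySem.List.pySetD s.2 v (PySem.List.pyGetD s.2 v 0 - 1)
          if PySem.List.pyGetD ind2 v 0 = 0 then (s.1 ++ [v], ind2) else (s.1, ind2)) (q, ind1) := by
        rw [List.foldl_cons]
        congr 1
        show (if PySem.List.pyGetD ind1 v0 0 = 0 then (q ++ [v0], ind1) else (q, ind1)) = _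
        rw [if_neg (by omega)]
      rw [hstep]
      have hqz1 : ∀ x ∈ q, PySem.List.pyGetD ind1 x 0 = 0 := by
        intro x hx
        have hx0 := hqz x hx
        have hxv0 : x ≠ v0 := fun h => by rw [h] at hx0; omega
        rw [hget1 x (hq0 x hx), if_neg hxv0]; exact hx0
      obtain ⟨hLen, hPt, hMem, hNd, hBud⟩ := ih q ind1 hnodup hq0 hqz1 hvalrest hcountrest
      refine ⟨hLen.trans hlen1, ?_, ?_, hNd, ?_⟩
      · intro v hv
        rw [hPt v hv, hget1 v hv]
        by_cases hvv : v = v0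
        · subst hvv; rw [if_pos rfl, hcnt0]; ring
        · rw [if_neg hvv, hcountne v hvv]
      · intro x
        rw [hMem x]
        constructor
        · rintro (hx | ⟨hxr, hxe⟩)
          · exact Or.inl hx
          · by_cases hxv0 : x = v0
            · subst hxv0
              rw [hgv0] at hxe
              exact Or.inr ⟨by simp, by omega⟩
            · rw [hget1 x (hvalrest x hxr).1, if_neg hxv0] at hxe
              exact Or.inr ⟨by simp [hxr], by rw [hcountne x hxv0]; exact hxe⟩
        · rintro (hx | ⟨hxr, hxe⟩)
          · exact Or.inl hx
          · by_cases hxv0 : x = v0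
            · rw [hxv0] at hxe
              rw [hcnt0] at hxe
              have hrpos : 0 < rest.count v0 := by omega
              refine Or.inr ⟨by rw [hxv0]; exact List.count_pos_iff.1 hrpos, ?_⟩
              rw [hxv0, hgv0]; omega
            · rcases List.mem_cons.1 hxr with h | hxrest
              · exact absurd h hxv0
              · refine Or.inr ⟨hxrest, ?_⟩
                rw [hget1 x (hvalrest x hxrest).1, if_neg hxv0, ← hcountne x hxv0]
                exact hxe
      · omega

theorem pvKahn_run (n : Int) (graph : List (List Int))
    (hrows : ∀ i ∈ PySem.List.pyRange 1 (n+1) 1, ∀ j ∈ PySem.List.pyGetD graph i [],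
      j ∈ PySem.List.pyRange 1 (n+1) 1) (hn : 1 ≤ n) :
    ∀ (f : Nat) (q ind done : List Int), pvINV n graph done q ind →
      q.length + pvSumPos ind ≤ f →
      ∃ ord ind', pvKahnLoop graph f q ind done = ord ∧ pvINV n graph ord [] ind' := by
  have hLInt : (((n+1).toNat : Nat) : Int) = n + 1 := by omega
  intro f
  induction f with
  | zero =>
    intro q ind done hinv hbud
    have hq : q = [] := List.eq_nil_of_length_eq_zero (by omega)
    subst hq
    exact ⟨done, ind, rfl, hinv⟩
  | succ f ih =>
    intro q ind done hinv hbud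
    match q with
    | [] => exact ⟨done, ind, rfl, hinv⟩
    | u :: q' =>
      obtain ⟨hIndLen, hNodup, hMem, hSpec, hZero, hQz, hDz, hPrefix⟩ := hinv
      have hu_range : u ∈ PySem.List.pyRange 1 (n+1) 1 := hMem u (by simp)
      have hu_b := (PySem.List.mem_pyRange_one).1 hu_range
      have hu_done : u ∉ done := by
        intro h
        have := List.disjoint_of_nodup_append hNodup
        exact this h (by simp)
      have hu_q' : u ∉ q' := by
        have := (List.nodup_append.1 hNodup).2.1
        exact (List.nodup_cons.1 this).1
      have hq'_nodup : q'.Nodup := by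
        have := (List.nodup_append.1 hNodup).2.1
        exact (List.nodup_cons.1 this).2
      have hq'_range : ∀ x ∈ q', x ∈ PySem.List.pyRange 1 (n+1) 1 :=
        fun x hx => hMem x (by simp [hx])
      have hrowu : ∀ v ∈ PySem.List.pyGetD graph u [], v ∈ PySem.List.pyRange 1 (n+1) 1 :=
        fun v hv => hrows u hu_range v hv
      obtain ⟨hLen, hPt, hMemIff, hNd, hBud⟩ := pv_stepFold (PySem.List.pyGetD graph u []) q' ind
        hq'_nodup
        (fun x hx => by have := (PySem.List.mem_pyRange_one).1 (hq'_range x hx); omega)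
        (fun x hx => by
          have hb := (PySem.List.mem_pyRange_one).1 (hq'_range x hx)
          rw [hSpec x (by omega)]
          exact hQz x (by simp [hx]))
        (fun v hv => by
          have := (PySem.List.mem_pyRange_one).1 (hrowu v hv)
          rw [hIndLen]; omega)
        (fun v hv => by
          have hb := (PySem.List.mem_pyRange_one).1 (hrowu v hv)
          rw [hSpec v (by omega)]
          exact pvRem_ge_count n graph done v hu_range hu_done)
      set S := (PySem.List.pyGetD graph u []).foldl
        (fun (s : List Int × List Int) v =>
          let ind2 := PySem.List.pySetD s.2 v (PySem.List.pyGetD s.2 v 0 - 1)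
          if PySem.List.pyGetD ind2 v 0 = 0 then (s.1 ++ [v], ind2) else (s.1, ind2)) (q', ind)
        with hS
      have hrem1 : ∀ v : Int, 0 ≤ v → pvRem n graph (done ++ [u]) v =
          pvRem n graph done v - ((PySem.List.pyGetD graph u []).count v : Int) :=
        fun v _ => pvRem_append n graph done v hu_range hu_done
      have hremu : pvRem n graph done u = 0 := hQz u (by simp)
      -- membership in the new queue, phrased with pvRem
      have hMemIff' : ∀ x, x ∈ S.1 ↔ x ∈ q' ∨
          (x ∈ PySem.List.pyGetD graph u [] ∧
            pvRem n graph done x = ((PySem.List.pyGetD graph u []).count x : Int)) := by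
        intro x
        rw [hMemIff x]
        by_cases hx : x ∈ PySem.List.pyGetD graph u []
        · have hb := (PySem.List.mem_pyRange_one).1 (hrowu x hx)
          rw [hSpec x (by omega)]
        · simp [hx]
      have hS1_range : ∀ x ∈ S.1, x ∈ PySem.List.pyRange 1 (n+1) 1 := by
        intro x hx
        rcases (hMemIff' x).1 hx with hx | ⟨hx, _⟩
        · exact hq'_range x hx
        · exact hrowu x hx
      have hS1_notdone1 : ∀ x ∈ S.1, x ∉ done ++ [u] := by
        intro x hx hxd
        rcases (hMemIff' x).1 hx with hxq | ⟨hxr, hxe⟩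
        · rcases List.mem_append.1 hxd with h | h
          · exact (List.disjoint_of_nodup_append hNodup) h (by simp [hxq])
          · simp at h; subst h; exact hu_q' hxq
        · have hcpos : 0 < (PySem.List.pyGetD graph u []).count x := List.count_pos_iff.2 hxr
          rcases List.mem_append.1 hxd with h | h
          · have := hDz x h; omega
          · simp at h; subst h; omega
      have hdone1_nodup : (done ++ [u]).Nodup := by
        have hsub : (done ++ [u]).Sublist (done ++ u :: q') :=
          List.Sublist.append_left (by
            simpa using List.cons_sublist_cons.2 (List.nil_sublist q')) done
        exact hNodup.sublist hsub
      have hunf : pvKahnLoop graph (f+1) (u :: q') ind done =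
          pvKahnLoop graph f S.1 S.2 (done ++ [u]) := by rw [hS]; rfl
      rw [hunf]
      refine ih S.1 S.2 (done ++ [u]) ⟨?_, ?_, ?_, ?_, ?_, ?_, ?_, ?_⟩ ?_
      · rw [hLen, hIndLen]
      · rw [List.nodup_append]
        exact ⟨hdone1_nodup, hNd, fun a ha b hb hab => hS1_notdone1 b hb (hab ▸ ha)⟩
      · intro x hx
        rcases List.mem_append.1 hx with hx | hx
        · rcases List.mem_append.1 hx with hx | hx
          · exact hMem x (by simp [hx])
          · simp at hx; subst hx; exact hu_range
        · exact hS1_range x hx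
      · intro v hv
        rw [hPt v hv, hSpec v hv, hrem1 v hv]
      · intro u' hu'r hu'z
        have hb' := (PySem.List.mem_pyRange_one).1 hu'r
        rw [hrem1 u' (by omega)] at hu'z
        by_cases h0 : pvRem n graph done u' = 0
        · have := hZero u' hu'r h0
          rcases List.mem_append.1 this with h | h
          · exact List.mem_append.2 (Or.inl (by simp [h]))
          · rcases List.mem_cons.1 h with h | h
            · subst h; exact List.mem_append.2 (Or.inl (by simp))
            · exact List.mem_append.2 (Or.inr ((hMemIff' u').2 (Or.inl h)))
        · have hrnn := pvRem_nonneg n graph done u'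
          have hcnt : pvRem n graph done u' = ((PySem.List.pyGetD graph u []).count u' : Int) := by
            omega
          have hcpos : 0 < (PySem.List.pyGetD graph u []).count u' := by omega
          exact List.mem_append.2 (Or.inr ((hMemIff' u').2
            (Or.inr ⟨List.count_pos_iff.1 hcpos, hcnt⟩)))
      · intro x hx
        have hb' := (PySem.List.mem_pyRange_one).1 (hS1_range x hx)
        rw [hrem1 x (by omega)]
        rcases (hMemIff' x).1 hx with hxq | ⟨hxr, hxe⟩
        · have h0 := hQz x (by simp [hxq])
          have hge := pvRem_ge_count n graph done x hu_range hu_done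
          have := pvRem_nonneg n graph done x
          omega
        · omega
      · intro x hx
        rcases List.mem_append.1 hx with hxd | hxu
        · have h0 := hDz x hxd
          have hb' := (PySem.List.mem_pyRange_one).1 (hMem x (by simp [hxd]))
          rw [hrem1 x (by omega)]
          have hge := pvRem_ge_count n graph done x hu_range hu_done
          have := pvRem_nonneg n graph done x
          omega
        · simp at hxu; subst hxu
          rw [hrem1 x (by omega)]
          have hge := pvRem_ge_count n graph done x hu_range hu_done
          have := pvRem_nonneg n graph done x
          omega
      · intro k hk p hp
        rcases Nat.lt_or_ge k done.length with hklt | hkge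
        · have hgetk : (done ++ [u])[k] = done[k] := List.getElem_append_left hklt
          rw [hgetk] at hp
          have := hPrefix k hklt p hp
          rwa [List.take_append_of_le_length (by omega)]
        · have hkeq : k = done.length := by
            have := hk
            simp at this
            omega
          subst hkeq
          have hgetk : (done ++ [u])[done.length] = u := by simp
          rw [hgetk] at hp
          have hpd : p ∈ done := pvRem_zero_preds n graph done hremu hp
          rwa [List.take_append_of_le_length (le_refl _), List.take_length]
      · have hql : (u :: q').length = q'.length + 1 := rfl
        omega

theorem pv_complete (n : Int) (graph : List (List Int)) {ord ind : List Int}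
    (hinv : pvINV n graph ord [] ind)
    (hacyc : ∀ u : Int, 0 ≤ u → u < n + 1 → ¬ pvWalk n graph n.toNat u) (hn : 1 ≤ n) :
    ∀ u ∈ PySem.List.pyRange 1 (n+1) 1, u ∈ ord := by
  obtain ⟨_, _, _, _, hZero, _, _, _⟩ := hinv
  have key : ∀ (k : Nat), ∀ u ∈ PySem.List.pyRange 1 (n+1) 1, u ∉ ord → pvWalk n graph k u := by
    intro k
    induction k with
    | zero => intro u _ _; trivial
    | succ k ih =>
      intro u hur hu
      have hrem : pvRem n graph ord u ≠ 0 := by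
        intro h0
        exact hu (by simpa using hZero u hur h0)
      obtain ⟨p, hedge, hpd⟩ := pvRem_pos_pred n graph ord hrem
      exact ⟨p, hedge, ih p hedge.1 hpd⟩
  intro u hur
  by_contra hu
  have hb := (PySem.List.mem_pyRange_one).1 hur
  exact hacyc u (by omega) (by omega) (key n.toNat u hur hu)

-- ---- A-side: the relaxation fold over the topological order ----
def pvM (n : Int) (build_time : List Int) (graph : List (List Int)) (done : List Int) (v : Int) : Int :=
  (done.map (fun p => if v ∈ PySem.List.pyGetD graph p [] then pvV n build_time graph p else 0)).foldl max 0

theorem pvM_nonneg (n : Int) (build_time : List Int) (graph : List (List Int)) (done : List Int) (v : Int) :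
    0 ≤ pvM n build_time graph done v :=
  (PySem.List.le_foldl_max _ 0).1

theorem pvM_append (n : Int) (build_time : List Int) (graph : List (List Int)) (done : List Int) (p v : Int) :
    pvM n build_time graph (done ++ [p]) v =
      max (pvM n build_time graph done v)
        (if v ∈ PySem.List.pyGetD graph p [] then pvV n build_time graph p else 0) := by
  unfold pvM
  rw [List.map_append, List.foldl_append]
  simp

theorem pvM_eq_predsmax (n : Int) (build_time : List Int) (graph : List (List Int))
    (done : List Int) {u : Int}
    (hpreds : ∀ p, pvEdge n graph p u → p ∈ done)
    (hdone : ∀ p ∈ done, p ∈ PySem.List.pyRange 1 (n+1) 1)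
    (hmem : ∀ p, p ∈ PySem.List.pyGetD (pvPreds n graph) u [] ↔ pvEdge n graph p u) :
    ((PySem.List.pyGetD (pvPreds n graph) u []).map (fun p => pvV n build_time graph p)).foldl max 0 =
      pvM n build_time graph done u := by
  apply le_antisymm
  · apply pv_foldl_max_le _ _ _ (pvM_nonneg n build_time graph done u)
    intro x hx
    obtain ⟨p, hp, rfl⟩ := List.mem_map.1 hx
    have hedge := (hmem p).1 hp
    have hpd := hpreds p hedge
    have hterm : (if u ∈ PySem.List.pyGetD graph p [] then pvV n build_time graph p else 0) ∈
        done.map (fun p => if u ∈ PySem.List.pyGetD graph p [] then pvV n build_time graph p else 0) :=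
      List.mem_map.2 ⟨p, hpd, rfl⟩
    have := (PySem.List.le_foldl_max (done.map
      (fun p => if u ∈ PySem.List.pyGetD graph p [] then pvV n build_time graph p else 0)) 0).2 _ hterm
    rw [if_pos hedge.2] at this
    exact this
  · apply pv_foldl_max_le _ _ _ (PySem.List.le_foldl_max _ 0).1
    intro x hx
    obtain ⟨p, hp, rfl⟩ := List.mem_map.1 hx
    by_cases hrow : u ∈ PySem.List.pyGetD graph p []
    · rw [if_pos hrow]
      have hedge : pvEdge n graph p u := ⟨hdone p hp, hrow⟩
      have hpp : p ∈ PySem.List.pyGetD (pvPreds n graph) u [] := (hmem p).2 hedge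
      exact (PySem.List.le_foldl_max _ 0).2 _ (List.mem_map.2 ⟨p, hpp, rfl⟩)
    · rw [if_neg hrow]
      exact (PySem.List.le_foldl_max _ 0).1

theorem pv_relaxFold (L : Nat) :
    ∀ (row : List Int) (sub : List Int) (i c : Int), sub.length = L →
    0 ≤ i → i < (L : Int) → (∀ v ∈ row, 0 ≤ v ∧ v < (L:Int)) →
    PySem.List.pyGetD sub i 0 = c →
    (let r := row.foldl (fun s j =>
        PySem.List.pySetD s j (max (PySem.List.pyGetD s j 0) (PySem.List.pyGetD s i 0))) sub
     r.length = L ∧ ∀ v : Int, 0 ≤ v →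
       PySem.List.pyGetD r v 0 = if v ∈ row then max (PySem.List.pyGetD sub v 0) c
         else PySem.List.pyGetD sub v 0) := by
  intro row
  induction row with
  | nil => intro sub i c hlen _ _ _ _; exact ⟨hlen, fun v _ => by simp⟩
  | cons j0 rest ih =>
    intro sub i c hlen hi0 hiL hval hci
    obtain ⟨hj00, hj0L⟩ := hval j0 (by simp)
    set s1 := PySem.List.pySetD sub j0 (max (PySem.List.pyGetD sub j0 0) (PySem.List.pyGetD sub i 0))
      with hs1
    have hlen1 : s1.length = L := by rw [hs1, PySem.List.length_pySetD]; exact hlen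
    have hget1 : ∀ v : Int, 0 ≤ v → PySem.List.pyGetD s1 v 0 =
        if v = j0 then max (PySem.List.pyGetD sub j0 0) c else PySem.List.pyGetD sub v 0 := by
      intro v hv
      rw [hs1, hci, pv_get_set sub _ 0 hj00 (by omega) hv]
    have hc1 : PySem.List.pyGetD s1 i 0 = c := by
      rw [hget1 i hi0]
      by_cases hij : i = j0
      · rw [if_pos hij, ← hij, hci]; exact max_self c
      · rw [if_neg hij, hci]
    obtain ⟨hLen, hPt⟩ := ih s1 i c hlen1 hi0 hiL (fun v hv => hval v (by simp [hv])) hc1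
    refine ⟨by rw [List.foldl_cons]; exact hLen, ?_⟩
    intro v hv
    rw [List.foldl_cons, ← hs1, hPt v hv, hget1 v hv]
    by_cases hvj : v = j0
    · rw [if_pos hvj, if_pos (show v ∈ j0 :: rest from by rw [hvj]; simp)]
      by_cases hvr : v ∈ rest
      · rw [if_pos hvr, max_assoc, max_self, hvj]
      · rw [if_neg hvr, hvj]
    · rw [if_neg hvj]
      by_cases hvr : v ∈ rest
      · rw [if_pos hvr, if_pos (show v ∈ j0 :: rest from by simp [hvr])]
      · rw [if_neg hvr, if_neg (show ¬ v ∈ j0 :: rest from by simp [hvr, hvj])]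

theorem pv_dpFold (n : Int) (build_time : List Int) (graph : List (List Int)) (ord : List Int)
    (hrows : ∀ i ∈ PySem.List.pyRange 1 (n+1) 1, ∀ j ∈ PySem.List.pyGetD graph i [],
      j ∈ PySem.List.pyRange 1 (n+1) 1) (hn : 1 ≤ n)
    (hacyc : ∀ u : Int, 0 ≤ u → u < n + 1 → ¬ pvWalk n graph n.toNat u)
    (hnodup : ord.Nodup) (hmem : ∀ x ∈ ord, x ∈ PySem.List.pyRange 1 (n+1) 1)
    (hprefix : ∀ (k : Nat) (hk : k < ord.length), ∀ p, pvEdge n graph p ord[k] → p ∈ ord.take k) :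
    ∀ (rest done sub : List Int), ord = done ++ rest → sub.length = (n+1).toNat →
    (∀ v : Int, 0 ≤ v → PySem.List.pyGetD sub v 0 =
      if v ∈ done then pvV n build_time graph v else pvM n build_time graph done v) →
    (let r := rest.foldl (fun sub i =>
        let sub1 := PySem.List.pySetD sub i (PySem.List.pyGetD sub i 0 + PySem.List.pyGetD build_time i 0)
        (PySem.List.pyGetD graph i []).foldl
          (fun s j => PySem.List.pySetD s j (max (PySem.List.pyGetD s j 0) (PySem.List.pyGetD s i 0))) sub1) sub
     ∀ v : Int, 0 ≤ v → PySem.List.pyGetD r v 0 =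
       if v ∈ ord then pvV n build_time graph v else pvM n build_time graph ord v) := by
  have hLInt : (((n+1).toNat : Nat) : Int) = n + 1 := by omega
  intro rest
  induction rest with
  | nil =>
    intro done sub hord hlen hsub
    exact fun v hv => by
      rw [List.foldl_nil, hsub v hv, hord, List.append_nil]
  | cons i rest' ih =>
    intro done sub hord hlen hsub
    subst hord
    have hiord : i ∈ done ++ i :: rest' := by simp
    have hirange : i ∈ PySem.List.pyRange 1 (n+1) 1 := hmem i hiord
    have hib := (PySem.List.mem_pyRange_one).1 hirange
    have hidone : i ∉ done := by
      intro h
      have := List.disjoint_of_nodup_append hnodup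
      exact this h (by simp)
    have hkidx : done.length < (done ++ i :: rest').length := by simp
    have hordi : (done ++ i :: rest')[done.length]'hkidx = i := by
      simp
    have htake : (done ++ i :: rest').take done.length = done := by
      rw [List.take_append_of_le_length (le_refl _), List.take_length]
    have hpredsi : ∀ p, pvEdge n graph p i → p ∈ done := by
      intro p hp
      have := hprefix done.length hkidx p (by rw [hordi]; exact hp)
      rwa [htake] at this
    have hdone_range : ∀ p ∈ done, p ∈ PySem.List.pyRange 1 (n+1) 1 :=
      fun p hp => hmem p (by simp [hp])
    have hVi : pvV n build_time graph i =
        PySem.List.pyGetD build_time i 0 + pvM n build_time graph done i := by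
      rw [pvV_rec n build_time graph hrows hn (by omega) (by omega)
        (hacyc i (by omega) (by omega))]
      congr 1
      exact pvM_eq_predsmax n build_time graph done hpredsi hdone_range
        (fun p => pv_mem_preds n graph hrows hn (by omega) p)
    set sub1 := PySem.List.pySetD sub i
      (PySem.List.pyGetD sub i 0 + PySem.List.pyGetD build_time i 0) with hsub1
    have hlen1 : sub1.length = (n+1).toNat := by rw [hsub1, PySem.List.length_pySetD]; exact hlen
    have hget1 : ∀ v : Int, 0 ≤ v → PySem.List.pyGetD sub1 v 0 =
        if v = i then pvV n build_time graph i else PySem.List.pyGetD sub v 0 := by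
      intro v hv
      rw [hsub1, pv_get_set sub _ 0 (by omega) (by rw [hlen]; omega) hv]
      by_cases hvi : v = i
      · rw [if_pos hvi, if_pos hvi, hsub i (by omega), if_neg hidone, hVi]
        ring
      · rw [if_neg hvi, if_neg hvi]
    have hc1 : PySem.List.pyGetD sub1 i 0 = pvV n build_time graph i := by
      rw [hget1 i (by omega), if_pos rfl]
    obtain ⟨hLen2, hPt2⟩ := pv_relaxFold (n+1).toNat (PySem.List.pyGetD graph i []) sub1 i
      (pvV n build_time graph i) hlen1 (by omega) (by omega)
      (fun v hv => by
        have := (PySem.List.mem_pyRange_one).1 (hrows i hirange v hv)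
        omega)
      hc1
    set r1 := (PySem.List.pyGetD graph i []).foldl
      (fun s j => PySem.List.pySetD s j (max (PySem.List.pyGetD s j 0) (PySem.List.pyGetD s i 0))) sub1
      with hr1
    have hnew : ∀ v : Int, 0 ≤ v → PySem.List.pyGetD r1 v 0 =
        if v ∈ done ++ [i] then pvV n build_time graph v
        else pvM n build_time graph (done ++ [i]) v := by
      intro v hv
      rw [hr1, hPt2 v hv]
      by_cases hvi : v = i
      · rw [if_pos (show v ∈ done ++ [i] from by rw [hvi]; simp)]
        by_cases hrow : v ∈ PySem.List.pyGetD graph i []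
        · rw [if_pos hrow, hget1 v hv, if_pos hvi, hvi, max_self]
        · rw [if_neg hrow, hget1 v hv, if_pos hvi, hvi]
      · rw [hget1 v hv, if_neg hvi]
        by_cases hvd : v ∈ done
        · have hvrow : v ∉ PySem.List.pyGetD graph i [] := by
            intro hrow
            have hedge : pvEdge n graph i v := ⟨hirange, hrow⟩
            obtain ⟨k, hk, hkv⟩ := List.getElem_of_mem hvd
            have hkord : k < (done ++ i :: rest').length := by simp; omega
            have hordk : (done ++ i :: rest')[k]'hkord = v :=
              (List.getElem_append_left hk).trans hkv
            have hpref := hprefix k hkord i (by rw [hordk]; exact hedge)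
            have htk : (done ++ i :: rest').take k ⊆ done := by
              rw [List.take_append_of_le_length (by omega)]
              exact (List.take_subset k done)
            exact hidone (htk hpref)
          rw [if_neg hvrow,
            if_pos (show v ∈ done ++ [i] from by simp [hvd]), hsub v hv, if_pos hvd]
        · rw [if_neg (show ¬ v ∈ done ++ [i] from by simp [hvd, hvi]), pvM_append]
          by_cases hrow : v ∈ PySem.List.pyGetD graph i []
          · rw [if_pos hrow, if_pos hrow, hsub v hv, if_neg hvd]
          · rw [if_neg hrow, if_neg hrow, max_eq_left (pvM_nonneg n build_time graph done v),
              hsub v hv, if_neg hvd]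
    have hstep : (i :: rest').foldl (fun sub i =>
        let sub1 := PySem.List.pySetD sub i (PySem.List.pyGetD sub i 0 + PySem.List.pyGetD build_time i 0)
        (PySem.List.pyGetD graph i []).foldl
          (fun s j => PySem.List.pySetD s j (max (PySem.List.pyGetD s j 0) (PySem.List.pyGetD s i 0))) sub1) sub =
        rest'.foldl (fun sub i =>
        let sub1 := PySem.List.pySetD sub i (PySem.List.pyGetD sub i 0 + PySem.List.pyGetD build_time i 0)
        (PySem.List.pyGetD graph i []).foldl
          (fun s j => PySem.List.pySetD s j (max (PySem.List.pyGetD s j 0) (PySem.List.pyGetD s i 0))) sub1) r1 := by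
      rw [List.foldl_cons, hr1, hsub1]
    rw [hstep]
    exact ih (done ++ [i]) r1 (by rw [List.append_assoc]; rfl)
      hLen2 hnew

theorem pv_run_core (n : Int) (build_time : List Int) (graph : List (List Int)) (w : Int)
    (hn : 1 ≤ n)
    (hrows : ∀ i ∈ PySem.List.pyRange 1 (n+1) 1, ∀ j ∈ PySem.List.pyGetD graph i [],
      j ∈ PySem.List.pyRange 1 (n+1) 1)
    (hacyc : ∀ u : Int, 0 ≤ u → u < n + 1 → ¬ pvWalk n graph n.toNat u)
    (hw1 : 1 ≤ w) (hw2 : w ≤ n) (I Q : List Int)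
    (hIlen : I.length = (n+1).toNat)
    (hIget : ∀ v : Int, 0 ≤ v → PySem.List.pyGetD I v 0 = pvRem n graph [] v)
    (hIsum : pvSumPos I ≤ pvGraphSize n graph)
    (hQ : Q = (PySem.List.pyRange 1 (n+1) 1).filter
      (fun i => decide (PySem.List.pyGetD I i 0 = 0))) :
    PySem.List.pyGetD ((pvKahnLoop graph ((n+1).toNat + pvGraphSize n graph + 1) Q I []).foldl
      (fun sub i =>
        let sub1 := PySem.List.pySetD sub i
          (PySem.List.pyGetD sub i 0 + PySem.List.pyGetD build_time i 0)
        (PySem.List.pyGetD graph i []).foldl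
          (fun s j => PySem.List.pySetD s j
            (max (PySem.List.pyGetD s j 0) (PySem.List.pyGetD s i 0))) sub1)
      (List.replicate (n+1).toNat 0)) w 0 = pvV n build_time graph w := by
  have hLInt : (((n+1).toNat : Nat) : Int) = n + 1 := by omega
  have hQnodup : Q.Nodup := by
    rw [hQ]; exact (PySem.List.nodup_pyRange_one 1 (n+1)).filter _
  have hQsub : ∀ x ∈ Q, x ∈ PySem.List.pyRange 1 (n+1) 1 := by
    intro x hx; rw [hQ] at hx; exact (List.mem_filter.1 hx).1
  have hQzero : ∀ x ∈ Q, PySem.List.pyGetD I x 0 = 0 := by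
    intro x hx; rw [hQ] at hx
    simpa using (List.mem_filter.1 hx).2
  have hINV : pvINV n graph [] Q I := by
    refine ⟨hIlen, by simpa using hQnodup, ?_, hIget, ?_, ?_, ?_, ?_⟩
    · intro x hx
      simp only [List.nil_append] at hx
      exact hQsub x hx
    · intro u hur h0
      have hb := (PySem.List.mem_pyRange_one).1 hur
      have hz : PySem.List.pyGetD I u 0 = 0 := by rw [hIget u (by omega)]; exact h0
      simp only [List.nil_append]
      rw [hQ]
      exact List.mem_filter.2 ⟨hur, by simpa using hz⟩
    · intro x hx
      have hb := (PySem.List.mem_pyRange_one).1 (hQsub x hx)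
      rw [← hIget x (by omega)]
      exact hQzero x hx
    · intro x hx; exact absurd hx (List.not_mem_nil)
    · intro k hk; simp at hk
  have hbud : Q.length + pvSumPos I ≤ (n+1).toNat + pvGraphSize n graph + 1 := by
    have h1 : Q.length ≤ (PySem.List.pyRange 1 (n+1) 1).length := by
      rw [hQ]; exact List.length_filter_le _ _
    have h2 : (PySem.List.pyRange 1 (n+1) 1).length = (n+1-1).toNat :=
      PySem.List.length_pyRange_one 1 (n+1)
    omega
  obtain ⟨ord, ind', hloop, hinv'⟩ := pvKahn_run n graph hrows hn
    ((n+1).toNat + pvGraphSize n graph + 1) Q I [] hINV hbud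
  have hcomplete := pv_complete n graph hinv' hacyc hn
  obtain ⟨_, hnodup', hmem', _, _, _, _, hprefix'⟩ := hinv'
  have hordnodup : ord.Nodup := by simpa using hnodup'
  have hordmem : ∀ x ∈ ord, x ∈ PySem.List.pyRange 1 (n+1) 1 := by
    intro x hx; exact hmem' x (by simpa using hx)
  have hdp := pv_dpFold n build_time graph ord hrows hn hacyc hordnodup hordmem
    (by
      intro k hk p hp
      have := hprefix' k hk p hp
      exact this)
    ord [] (List.replicate (n+1).toNat 0) rfl (by simp)
    (by
      intro v hv
      rw [if_neg (List.not_mem_nil)]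
      have hM : pvM n build_time graph [] v = 0 := rfl
      rw [hM]
      by_cases hL : v < ((n+1).toNat : Int)
      · exact pv_getD_replicate _ _ _ hv hL
      · exact pv_getD_default _ _ (by simpa using hL))
  rw [hloop]
  have hw_ord : w ∈ ord := hcomplete w (PySem.List.mem_pyRange_one.2 ⟨hw1, by omega⟩)
  have := hdp w (by omega)
  rw [this, if_pos hw_ord]

theorem pv_assemble (n : Int) (build_time : List Int) (graph : List (List Int)) (w : Int)
    (hn : 1 ≤ n)
    (hrows : ∀ i ∈ PySem.List.pyRange 1 (n+1) 1, ∀ j ∈ PySem.List.pyGetD graph i [],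
      j ∈ PySem.List.pyRange 1 (n+1) 1)
    (hacyc : ∀ u : Int, 0 ≤ u → u < n + 1 → ¬ pvWalk n graph n.toNat u)
    (hw1 : 1 ≤ w) (hw2 : w ≤ n) :
    min_time_to_build n build_time graph w = pvV n build_time graph w := by
  obtain ⟨hIlen, hIget, hIsum⟩ := pv_indegree_init n graph hrows hn
  have hQ : (PySem.List.pyRange 1 (n+1) 1).foldl
      (fun q i => if PySem.List.pyGetD ((PySem.List.pyRange 1 (n+1) 1).foldl
        (fun ind i => (PySem.List.pyGetD graph i []).foldl
          (fun ind j => PySem.List.pySetD ind j (PySem.List.pyGetD ind j 0 + 1)) ind)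
        (List.replicate (n+1).toNat (0:Int))) i 0 = 0 then q ++ [i] else q) [] =
      (PySem.List.pyRange 1 (n+1) 1).filter
        (fun i => decide (PySem.List.pyGetD ((PySem.List.pyRange 1 (n+1) 1).foldl
          (fun ind i => (PySem.List.pyGetD graph i []).foldl
            (fun ind j => PySem.List.pySetD ind j (PySem.List.pyGetD ind j 0 + 1)) ind)
          (List.replicate (n+1).toNat (0:Int))) i 0 = 0)) := by
    rw [show (fun (q : List Int) (i : Int) =>
        if PySem.List.pyGetD ((PySem.List.pyRange 1 (n+1) 1).foldl
          (fun ind i => (PySem.List.pyGetD graph i []).foldl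
            (fun ind j => PySem.List.pySetD ind j (PySem.List.pyGetD ind j 0 + 1)) ind)
          (List.replicate (n+1).toNat (0:Int))) i 0 = 0 then q ++ [i] else q) =
        (fun (q : List Int) (x : Int) =>
          if (fun i => decide (PySem.List.pyGetD ((PySem.List.pyRange 1 (n+1) 1).foldl
            (fun ind i => (PySem.List.pyGetD graph i []).foldl
              (fun ind j => PySem.List.pySetD ind j (PySem.List.pyGetD ind j 0 + 1)) ind)
            (List.replicate (n+1).toNat (0:Int))) x 0 = 0)) x = true then q ++ [id x] else q)
      from by funext q i; simp]
    rw [PySem.List.foldl_append_if]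
    simp
  exact pv_run_core n build_time graph w hn hrows hacyc hw1 hw2 _ _ hIlen hIget hIsum hQ

-- ===== VERDICT (by name: the statement is the Claim_ definition above) =====
theorem min_time_to_build_spec : Claim_equal_min_time_to_build := by
  intro n build_time graph w hdom hpre
  show min_time_to_build n build_time graph w = min_time_to_build_alt n build_time graph w
  rcases hpre with ⟨hn0, _, _⟩ | ⟨hn, hbt, hg, hrows, hw1, hw2, hlayer⟩
  · subst hn0; rfl
  · have hacyc := pv_acyc n graph hrows hlayer hn
    rw [pv_assemble n build_time graph w hn hrows hacyc hw1 hw2]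
    rfl
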